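-- pv_equiv track=rewrite | github.com/stac-utils/stac-fastapi-pgstac | stac_fastapi/pgstac/utils.py | clean_exclude
-- ===== SOURCE A (Python) =====
-- def clean_exclude(
--     include: set[str],
--     exclude: set[str],
-- ) -> set[str]:
--     """Clean the exclude set to ensure precedence of the include set.
--
--     Cleaning includes:
--     - Removing any fields from the exclude set that are also in the include set, since
--       the include set takes precedence.
--     - Removing any fields from the exclude set that are parent paths of fields in the include set,
--       since including a sub-field of an excluded parent field should take precedence.
--     """
--     intersection = include.intersection(exclude)
--     if intersection:
--         exclude = exclude - intersection
--     for field_excluded in exclude: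
--         for field_included in include:
--             if field_included.startswith(field_excluded + "."):
--                 exclude = exclude - {field_excluded}
--                 pass
--     return exclude
-- ===== SOURCE B (Python) =====
-- def clean_exclude(
--     include: set[str],
--     exclude: set[str],
-- ) -> set[str]:
--     """Clean the exclude set to ensure precedence of the include set.
--
--     Different strategy: instead of scanning exclude x include with startswith,
--     build once the set of all strict dot-ancestor prefixes of the included
--     fields, then compute the answer as a single set difference
--     exclude - include - prefixes.
--     """
--     prefixes = set()
--     for f in include:
--         for i, ch in enumerate(f):
--             if ch == ".":
--                 prefixes.add(f[:i])
--     return exclude - include - prefixes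
-- ===== Notes on version B (the rewrite author's own statement) =====
-- stated objective: faster
-- what changed: Replaces the nested exclude-times-include startswith scan (and the separate intersection pass) with a one-time index of all strict dot-ancestor prefixes of the included fields followed by a single set difference exclude - include - prefixes.
import Mathlib
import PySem

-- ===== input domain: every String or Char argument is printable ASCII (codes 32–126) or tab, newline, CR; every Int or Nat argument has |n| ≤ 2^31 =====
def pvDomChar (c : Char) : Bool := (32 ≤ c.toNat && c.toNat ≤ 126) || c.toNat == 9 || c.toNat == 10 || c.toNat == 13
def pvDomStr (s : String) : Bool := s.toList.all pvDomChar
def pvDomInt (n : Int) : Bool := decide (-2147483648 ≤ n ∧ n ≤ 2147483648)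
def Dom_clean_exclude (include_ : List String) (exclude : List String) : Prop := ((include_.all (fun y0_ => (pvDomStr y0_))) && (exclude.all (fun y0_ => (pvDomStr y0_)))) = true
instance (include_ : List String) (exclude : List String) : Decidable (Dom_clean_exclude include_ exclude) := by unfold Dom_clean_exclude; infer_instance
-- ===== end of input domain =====

-- B replaces A's nested exclude×include startswith scan by a one-shot index of the strict
-- dot-ancestor prefixes of the included fields and a single set difference (objective: faster).

-- ===== PORT A =====
def clean_exclude (include_ : List String) (exclude : List String) : List String :=
  let intersection : PySem.Set String := PySem.Set.inter include_ exclude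
  let exclude1 : PySem.Set String :=
    if intersection.length ≠ 0 then PySem.Set.diff exclude intersection else exclude
  exclude1.foldl
    (fun ex field_excluded =>
      include_.foldl
        (fun ex2 field_included =>
          if PySem.Str.startswith field_included (field_excluded ++ ".") then
            PySem.Set.diff ex2 (PySem.Set.ofList [field_excluded])
          else ex2)
        ex)
    exclude1

-- ===== PORT B =====
-- 'f[:i]' with i the (nonnegative) enumerate index is ported exactly by PySem.Str.slice f none (some i).
def clean_exclude_alt (include_ : List String) (exclude : List String) : List String :=
  let prefixes : PySem.Set String :=
    include_.foldl
      (fun ps f =>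
        (PySem.List.enumerate f.toList).foldl
          (fun ps2 ic =>
            if ic.2 = '.' then PySem.Set.add ps2 (PySem.Str.slice f none (some ic.1)) else ps2)
          ps)
      PySem.Set.empty
  PySem.Set.diff (PySem.Set.diff exclude include_) prefixes

-- ===== PRECONDITION & SPEC =====
def Spec_clean_exclude (include_ : List String) (exclude : List String) (out : List String) : Prop := out = clean_exclude_alt include_ exclude
instance (include_ : List String) (exclude : List String) (out : List String) : Decidable (Spec_clean_exclude include_ exclude out) := by unfold Spec_clean_exclude; infer_instance

-- ===== CLAIM (what is proved, stated in full; the proofs are below) =====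
def Claim_equal_clean_exclude : Prop := ∀ (include_ : List String) (exclude : List String), Dom_clean_exclude include_ exclude → Spec_clean_exclude include_ exclude (clean_exclude include_ exclude)

-- ===== LEMMAS AND PROOFS =====

-- removal of one element twice is removal once
theorem pv_diff_idem (a t : List String) :
    PySem.Set.diff (PySem.Set.diff a t) t = PySem.Set.diff a t := by
  simp [PySem.Set.diff, List.filter_filter]

-- A's inner loop: remove e iff some included field starts with e ++ "."
theorem pv_innerA (include_ : List String) (e : String) (a : List String) :
    include_.foldl
      (fun ex2 field_included =>
        if PySem.Str.startswith field_included (e ++ ".") then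
          PySem.Set.diff ex2 (PySem.Set.ofList [e])
        else ex2) a
    = if include_.any (fun i => PySem.Str.startswith i (e ++ ".")) then
        PySem.Set.diff a (PySem.Set.ofList [e]) else a := by
  induction include_ generalizing a with
  | nil => simp
  | cons i is ih =>
    simp only [List.foldl_cons, List.any_cons]
    by_cases h : PySem.Str.startswith i (e ++ ".") = true
    · rw [if_pos h, ih, if_pos (show (PySem.Str.startswith i (e ++ ".") || is.any fun i => PySem.Str.startswith i (e ++ ".")) = true by simp only [h, Bool.true_or])]
      by_cases hany : (is.any fun i => PySem.Str.startswith i (e ++ ".")) = true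
      · rw [if_pos hany, pv_diff_idem]
      · rw [if_neg hany]
    · simp only [Bool.not_eq_true] at h
      rw [if_neg (by simp only [h, Bool.false_eq_true, not_false_eq_true]), ih]
      simp only [h, Bool.false_or]

theorem pv_diff_singleton (l : List String) (e : String) :
    PySem.Set.diff l (PySem.Set.ofList [e]) = l.filter (fun x => !(x == e)) := by
  simp only [PySem.Set.diff, PySem.Set.ofList]
  apply List.filter_congr
  intro x _
  rw [Bool.eq_iff_iff]
  simp

-- A's outer loop over s starting from l keeps exactly the elements not (in s and flagged by P)
theorem pv_outerA (P : String → Bool) (s l : List String) :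
    s.foldl (fun a e => if P e then PySem.Set.diff a (PySem.Set.ofList [e]) else a) l
    = l.filter (fun x => !(s.contains x && P x)) := by
  induction s generalizing l with
  | nil => simp
  | cons e s ih =>
    simp only [List.foldl_cons]
    rw [ih]
    by_cases hPe : P e = true
    · rw [if_pos hPe, pv_diff_singleton, List.filter_filter]
      apply List.filter_congr
      intro x _
      by_cases hxe : x = e
      · simp [hxe, hPe]
      · simp [hxe]
    · simp only [Bool.not_eq_true] at hPe
      rw [if_neg (by simp [hPe])]
      apply List.filter_congr
      intro x _
      by_cases hxe : x = e
      · simp [hxe, hPe]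
      · simp [hxe]

-- characterisation of A as one filter over exclude
theorem pv_A_eq_filter (include_ exclude : List String) :
    clean_exclude include_ exclude
    = exclude.filter (fun x =>
        !(include_.contains x) && !(include_.any (fun i => PySem.Str.startswith i (x ++ ".")))) := by
  have h0 : clean_exclude include_ exclude
      = (if (PySem.Set.inter include_ exclude).length ≠ 0
         then PySem.Set.diff exclude (PySem.Set.inter include_ exclude) else exclude).foldl
          (fun ex e => include_.foldl
            (fun ex2 i => if PySem.Str.startswith i (e ++ ".") then
                PySem.Set.diff ex2 (PySem.Set.ofList [e]) else ex2) ex)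
          (if (PySem.Set.inter include_ exclude).length ≠ 0
           then PySem.Set.diff exclude (PySem.Set.inter include_ exclude) else exclude) := rfl
  rw [h0]
  have hfun : (fun (ex : List String) (e : String) => include_.foldl
        (fun ex2 i => if PySem.Str.startswith i (e ++ ".") then
            PySem.Set.diff ex2 (PySem.Set.ofList [e]) else ex2) ex)
      = fun ex e => if include_.any (fun i => PySem.Str.startswith i (e ++ ".")) then
          PySem.Set.diff ex (PySem.Set.ofList [e]) else ex := by
    funext ex e; exact pv_innerA include_ e ex
  rw [hfun, pv_outerA]
  set E1 := (if (PySem.Set.inter include_ exclude).length ≠ 0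
             then PySem.Set.diff exclude (PySem.Set.inter include_ exclude) else exclude) with hE1
  have h2 : E1.filter (fun x => !(E1.contains x && include_.any (fun i => PySem.Str.startswith i (x ++ "."))))
      = E1.filter (fun x => !(include_.any (fun i => PySem.Str.startswith i (x ++ ".")))) := by
    apply List.filter_congr
    intro x hx
    simp [List.contains_eq_mem, hx]
  apply Eq.trans h2
  by_cases hI : (PySem.Set.inter include_ exclude).length ≠ 0
  · rw [hE1, if_pos hI]
    simp only [PySem.Set.diff, List.filter_filter]
    apply List.filter_congr
    intro x hx
    have hc : (PySem.Set.inter include_ exclude).contains x = include_.contains x := by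
      rw [Bool.eq_iff_iff]
      simp [PySem.Set.inter, List.contains_eq_mem, List.mem_filter, hx]
    rw [Bool.eq_iff_iff]
    simp only [hc]
    simp [Bool.and_comm]
  · have hlen : (PySem.Set.inter include_ exclude).length = 0 := not_not.mp hI
    have hempty := List.length_eq_zero_iff.mp hlen
    rw [hE1, if_neg hI]
    apply List.filter_congr
    intro x hx
    have hni : x ∉ include_ := fun hxin => by
      have hmem : x ∈ PySem.Set.inter include_ exclude := by
        simp [PySem.Set.inter, List.mem_filter, hxin, List.contains_eq_mem, hx]
      rw [hempty] at hmem
      simp at hmem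
    rw [Bool.eq_iff_iff]
    simp [List.contains_eq_mem, hni]

-- ===== B side =====

def pvPrefixes (include_ : List String) : List String :=
  include_.foldl
    (fun ps f =>
      (PySem.List.enumerate f.toList).foldl
        (fun ps2 ic =>
          if ic.2 = '.' then PySem.Set.add ps2 (PySem.Str.slice f none (some ic.1)) else ps2)
        ps)
    PySem.Set.empty

theorem pv_mem_inner (f : String) (s : List String) (x : String) :
    x ∈ (PySem.List.enumerate f.toList).foldl
          (fun ps2 ic =>
            if ic.2 = '.' then PySem.Set.add ps2 (PySem.Str.slice f none (some ic.1)) else ps2)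
          s
    ↔ x ∈ s ∨ PySem.Str.startswith f (x ++ ".") = true := by
  rw [PySem.List.foldl_ite_eq_foldl_filter (fun ic : Int × Char => ic.2 = '.')
        (fun ps2 ic => PySem.Set.add ps2 (PySem.Str.slice f none (some ic.1)))]
  rw [PySem.Set.mem_foldl_add _ (fun ic : Int × Char => PySem.Str.slice f none (some ic.1))]
  apply or_congr_right
  constructor
  · rintro ⟨ic, hic, rfl⟩
    rw [List.mem_filter] at hic
    obtain ⟨hmem, hdot⟩ := hic
    rw [PySem.List.mem_enumerate_iff] at hmem
    obtain ⟨k, hk, rfl⟩ := hmem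
    simp only [decide_eq_true_eq] at hdot
    simp only [PySem.Str.startswith_eq, PySem.Chars.startswith_iff]
    have htake : (PySem.Str.slice f none (some (0 + (k : Int)))).toList = f.toList.take k := by
      simp [PySem.Str.slice]
    rw [String.toList_append, htake]
    rw [show ("." : String).toList = ['.'] from by decide]
    have hstep : f.toList.take (k + 1) = f.toList.take k ++ ['.'] := by
      rw [List.take_add_one]
      simp [List.getElem?_eq_getElem hk, hdot]
    rw [← hstep]
    exact List.take_prefix _ _
  · intro h
    simp only [PySem.Str.startswith_eq, PySem.Chars.startswith_iff] at h
    obtain ⟨t, ht⟩ := h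
    rw [String.toList_append, show ("." : String).toList = ['.'] from by decide] at ht
    rw [List.append_assoc, List.singleton_append] at ht
    have hk : x.toList.length < f.toList.length := by
      rw [← ht]; simp
    refine ⟨((x.toList.length : Int), '.'), ?_, ?_⟩
    · rw [List.mem_filter]
      constructor
      · rw [PySem.List.mem_enumerate_iff]
        refine ⟨x.toList.length, hk, ?_⟩
        have hget : f.toList[x.toList.length]'hk = '.' := by
          rw [List.getElem_of_eq ht.symm]
          rw [List.getElem_append_right (le_refl _)]
          simp
        simp only [Prod.mk.injEq]
        exact ⟨by simp, hget.symm⟩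
      · simp
    · have htake : (PySem.Str.slice f none (some ((x.toList.length : Nat) : Int))).toList
          = f.toList.take x.toList.length := by
        simp [PySem.Str.slice]
      have htk : f.toList.take x.toList.length = x.toList := by
        rw [← ht, List.take_left]
      apply String.toList_inj.mp
      rw [htake, htk]

theorem pv_mem_prefixes (include_ : List String) (x : String) :
    x ∈ pvPrefixes include_ ↔ ∃ f ∈ include_, PySem.Str.startswith f (x ++ ".") = true := by
  have hfold : ∀ (fs : List String) (s : List String),
      (x ∈ fs.foldl
          (fun ps f =>
            (PySem.List.enumerate f.toList).foldl
              (fun ps2 ic =>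
                if ic.2 = '.' then PySem.Set.add ps2 (PySem.Str.slice f none (some ic.1)) else ps2)
              ps)
          s
        ↔ x ∈ s ∨ ∃ f ∈ fs, PySem.Str.startswith f (x ++ ".") = true) := by
    intro fs
    induction fs with
    | nil => simp
    | cons g gs ih =>
      intro s
      rw [List.foldl_cons, ih, pv_mem_inner]
      rw [List.exists_mem_cons_iff]
      tauto
  rw [pvPrefixes, hfold]
  simp [PySem.Set.empty]

theorem pv_contains_prefixes (include_ : List String) (x : String) :
    (pvPrefixes include_).contains x
    = include_.any (fun i => PySem.Str.startswith i (x ++ ".")) := by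
  rw [Bool.eq_iff_iff]
  simp [List.contains_eq_mem, pv_mem_prefixes, List.any_eq_true]

theorem pv_B_eq_filter (include_ exclude : List String) :
    clean_exclude_alt include_ exclude
    = exclude.filter (fun x =>
        !(include_.contains x) && !(include_.any (fun i => PySem.Str.startswith i (x ++ ".")))) := by
  have h0 : clean_exclude_alt include_ exclude
      = PySem.Set.diff (PySem.Set.diff exclude include_) (pvPrefixes include_) := rfl
  rw [h0]
  simp only [PySem.Set.diff, List.filter_filter]
  apply List.filter_congr
  intro x _
  rw [Bool.eq_iff_iff]
  simp only [PySem.Set.contains, pv_contains_prefixes]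
  simp [Bool.and_comm]

-- ===== VERDICT (by name: the statement is the Claim_ definition above) =====
theorem clean_exclude_spec : Claim_equal_clean_exclude := by
  intro include_ exclude _
  unfold Spec_clean_exclude
  rw [pv_A_eq_filter, pv_B_eq_filter]
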